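-- pv_equiv track=rewrite | github.com/immeritos/leetcode-acm | double-pointer/double-pointer5.py | countAtMostK
-- ===== SOURCE A (Python) =====
-- def countAtMostK(b, k):
--     left = 0
--     result = 0
--     count = 0
--     for right in range(len(b)):
--         if b[right] == 1:
--             count += 1
--         while count > k:
--             if b[left] == 1:
--                 count -= 1
--             left += 1
--         result += (right - left + 1)
--     return result
-- ===== SOURCE B (Python) =====
-- def countAtMostK(b, k):
--     # prefix-count + binary-search per right end (A uses a two-pointer window)
--     P = [0]
--     for x in b:
--         P.append(P[-1] + (1 if x == 1 else 0))
--     result = 0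
--     for r in range(len(b)):
--         t = P[r + 1] - k
--         lo, hi = 0, r + 1
--         while lo < hi:
--             mid = (lo + hi) // 2
--             if P[mid] < t:
--                 lo = mid + 1
--             else:
--                 hi = mid
--         result += r - lo + 1
--     return result
-- ===== Notes on version B (the rewrite author's own statement) =====
-- stated objective: alternative
-- what changed: Replaces the two-pointer sliding window by a prefix-count array plus a hand-written leftmost binary search per right end, summing r - bisect_left(P, P[r+1]-k, 0, r+1) + 1.
import Mathlib
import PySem

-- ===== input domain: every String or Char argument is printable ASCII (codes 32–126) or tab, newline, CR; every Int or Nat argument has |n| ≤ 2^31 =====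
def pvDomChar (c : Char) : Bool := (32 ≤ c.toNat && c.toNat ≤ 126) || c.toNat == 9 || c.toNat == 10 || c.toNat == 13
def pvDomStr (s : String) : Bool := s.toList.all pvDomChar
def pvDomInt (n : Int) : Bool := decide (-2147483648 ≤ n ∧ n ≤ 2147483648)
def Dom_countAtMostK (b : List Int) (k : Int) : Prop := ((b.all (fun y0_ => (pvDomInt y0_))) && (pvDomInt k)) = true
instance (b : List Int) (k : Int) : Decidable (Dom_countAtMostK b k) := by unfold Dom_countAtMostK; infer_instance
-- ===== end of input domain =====

-- B replaces A's two-pointer window with a prefix-count array and a per-right binary search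
-- (alternative decomposition, not claimed faster).

-- ===== PORT A =====
-- A's inner `while count > k` loop. The fuel argument only makes the recursion total:
-- fuel b.length - left is enough, since left advances by 1 each iteration and Python's
-- loop either stops (count ≤ k) or raises IndexError at left = len(b) (excluded by Pre_);
-- once left ≥ b.length both the fuel-0 return and the guard return the same (left, count).
def countAWhileGo (b : List Int) (k : Int) : Nat → Nat → Int → Nat × Int
  | 0, left, count => (left, count)
  | n + 1, left, count =>
    if count > k then
      if left < b.length then
        countAWhileGo b k n (left + 1) (if b.getD left 0 = 1 then count - 1 else count)
      else (left, count)
    else (left, count)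

def countAWhile (b : List Int) (k : Int) (left : Nat) (count : Int) : Nat × Int :=
  countAWhileGo b k (b.length - left) left count

-- one iteration of A's for-loop body over the state (left, count, result);
-- b[right] with right ∈ range(len(b)) is always in range, so getD is exact here.
def stepA (b : List Int) (k : Int) (st : Nat × Int × Int) (right : Nat) : Nat × Int × Int :=
  let count := if b.getD right 0 = 1 then st.2.1 + 1 else st.2.1
  let lc := countAWhile b k st.1 count
  (lc.1, lc.2, st.2.2 + ((right : Int) - (lc.1 : Int) + 1))

def countAtMostK (b : List Int) (k : Int) : Int :=
  ((List.range b.length).foldl (stepA b k) (0, 0, 0)).2.2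

-- ===== PORT B =====
-- P = [0]; for x in b: P.append(P[-1] + (1 if x == 1 else 0))
def buildP (b : List Int) : List Int :=
  b.foldl (fun P x => P ++ [(P.getLast?.getD 0) + (if x = 1 then 1 else 0)]) [0]

-- hand-written bisect_left on P over [lo, hi); all accesses are in range in B's use.
-- The fuel hi - lo only makes the recursion total (the interval shrinks each iteration).
def bisectGo (P : List Int) (t : Int) : Nat → Nat → Nat → Nat
  | 0, lo, _ => lo
  | n + 1, lo, hi =>
    if lo < hi then
      let mid := (lo + hi) / 2
      if P.getD mid 0 < t then bisectGo P t n (mid + 1) hi else bisectGo P t n lo mid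
    else lo

def bisectL (P : List Int) (t : Int) (lo hi : Nat) : Nat := bisectGo P t (hi - lo) lo hi

-- one iteration of B's for-loop body over the accumulated result
def stepB (b : List Int) (k : Int) (result : Int) (r : Nat) : Int :=
  let t := (buildP b).getD (r + 1) 0 - k
  let lo := bisectL (buildP b) t 0 (r + 1)
  result + ((r : Int) - (lo : Int) + 1)

def countAtMostK_alt (b : List Int) (k : Int) : Int :=
  (List.range b.length).foldl (stepB b k) 0

-- ===== PRECONDITION & SPEC =====
-- Pre_ excludes exactly the inputs where A raises: for k < 0 and nonempty b the inner
-- while loop never stops and indexes past the end (IndexError).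
def Pre_countAtMostK (b : List Int) (k : Int) : Prop := 0 ≤ k ∨ b = []
instance (b : List Int) (k : Int) : Decidable (Pre_countAtMostK b k) := by unfold Pre_countAtMostK; infer_instance
def pvWitness_countAtMostK : List Int × Int := ([1, 0, 1, 1], 2)

def Spec_countAtMostK (b : List Int) (k : Int) (out : Int) : Prop := out = countAtMostK_alt b k
instance (b : List Int) (k : Int) (out : Int) : Decidable (Spec_countAtMostK b k out) := by unfold Spec_countAtMostK; infer_instance

-- ===== CLAIM (what is proved, stated in full; the proofs are below) =====
def Claim_equal_countAtMostK : Prop := ∀ (b : List Int) (k : Int), Dom_countAtMostK b k → Pre_countAtMostK b k → Spec_countAtMostK b k (countAtMostK b k)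

-- ===== LEMMAS AND PROOFS =====

-- number of ones among the first i elements, as an Int
def Pc (b : List Int) (i : Nat) : Int := ((b.take i).countP (fun x => x == 1) : Int)

theorem Pc_step (b : List Int) (i : Nat) (h : i < b.length) :
    Pc b (i + 1) = Pc b i + (if b.getD i 0 = 1 then 1 else 0) := by
  unfold Pc
  rw [List.take_add_one, List.getElem?_eq_getElem h, List.countP_append]
  have hd : b.getD i 0 = b[i] := List.getD_eq_getElem b 0 h
  rw [hd]
  by_cases h1 : b[i] = 1 <;> simp [h1]

theorem Pc_stable (b : List Int) (i : Nat) (h : b.length ≤ i) : Pc b i = Pc b b.length := by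
  simp [Pc, List.take_of_length_le h, List.take_of_length_le (Nat.le_refl _)]

theorem Pc_mono (b : List Int) {i j : Nat} (h : i ≤ j) : Pc b i ≤ Pc b j := by
  induction j with
  | zero => simp_all
  | succ j ih =>
    rcases Nat.lt_or_ge i (j + 1) with hlt | hge
    · have hij : i ≤ j := Nat.lt_succ_iff.mp hlt
      rcases Nat.lt_or_ge j b.length with hj | hj
      · have := Pc_step b j hj
        have := ih hij
        split_ifs at * <;> omega
      · rw [Pc_stable b (j + 1) (by omega), ← Pc_stable b j hj]
        exact ih hij
    · have : i = j + 1 := by omega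
      exact le_of_eq (by rw [this])

theorem buildP_eq (b : List Int) : buildP b = (List.range (b.length + 1)).map (Pc b) := by
  induction b using List.reverseRecOn with
  | nil => simp [buildP, Pc]
  | append_singleton b x ih =>
    have hlast : (buildP b).getLast?.getD 0 = Pc b b.length := by
      rw [ih, List.range_succ, List.map_append]
      simp
    have htake : ∀ i, i ≤ b.length → Pc (b ++ [x]) i = Pc b i := by
      intro i hi
      simp [Pc, List.take_append_of_le_length hi]
    have hPcmap : (List.range (b.length + 1)).map (Pc (b ++ [x])) =
        (List.range (b.length + 1)).map (Pc b) := by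
      apply List.map_congr_left
      intro i hi
      exact htake i (by simpa using Nat.lt_succ_iff.mp (List.mem_range.mp hi))
    have hnew : Pc (b ++ [x]) (b.length + 1) = Pc b b.length + (if x = 1 then 1 else 0) := by
      unfold Pc
      rw [List.take_of_length_le (by simp), List.take_length, List.countP_append]
      by_cases h1 : x = 1 <;> simp [h1]
    simp only [buildP, List.foldl_append, List.foldl_cons, List.foldl_nil]
    rw [show (b.foldl (fun P x => P ++ [(P.getLast?.getD 0) + (if x = 1 then 1 else 0)]) [0]) = buildP b from rfl]
    rw [ih] at hlast ⊢
    rw [hlast]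
    simp only [List.length_append, List.length_singleton]
    rw [List.range_succ (n := b.length + 1), List.map_append, hPcmap]
    simp only [List.map_cons, List.map_nil]
    rw [hnew]

theorem buildP_getD (b : List Int) (i : Nat) (h : i ≤ b.length) :
    (buildP b).getD i 0 = Pc b i := by
  rw [buildP_eq]
  rw [List.getD_eq_getElem?_getD, List.getElem?_map, List.getElem?_range (by omega)]
  simp

-- A's while loop reaches the least l with Pc r - Pc l ≤ k
theorem countAWhileGo_spec (b : List Int) (k : Int) (hk : 0 ≤ k) (r : Nat) (hr : r ≤ b.length) :
    ∀ n left count, b.length - left ≤ n → left ≤ r → count = Pc b r - Pc b left →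
    (∀ l, l < left → k < Pc b r - Pc b l) →
    (countAWhileGo b k n left count).1 ≤ r ∧
    (countAWhileGo b k n left count).2 = Pc b r - Pc b (countAWhileGo b k n left count).1 ∧
    Pc b r - Pc b (countAWhileGo b k n left count).1 ≤ k ∧
    (∀ l, l < (countAWhileGo b k n left count).1 → k < Pc b r - Pc b l) := by
  intro n
  induction n with
  | zero =>
    intro left count hfuel hle hc hmin
    have hlr : left = r := by omega
    subst hlr
    simp only [countAWhileGo]
    have hc0 : count = 0 := by rw [hc]; ring
    refine ⟨Nat.le_refl _, hc, by omega, hmin⟩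
  | succ n ih =>
    intro left count hfuel hle hc hmin
    by_cases hck : count > k
    · have hlltr : left < r := by
        rcases Nat.lt_or_ge left r with h | h
        · exact h
        · exfalso; have : left = r := by omega
          subst this; simp at hc; omega
      have hlen : left < b.length := by omega
      simp only [countAWhileGo, if_pos hck, if_pos hlen]
      apply ih
      · omega
      · omega
      · rw [Pc_step b left hlen] at *
        split_ifs with h1
        · omega
        · omega
      · intro l hl
        rcases Nat.lt_or_ge l left with h | h
        · exact hmin l h
        · have : l = left := by omega
          subst this; omega
    · simp only [countAWhileGo, if_neg hck]
      exact ⟨hle, hc, by omega, hmin⟩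

-- bisectGo finds the least l with t ≤ Pc l
theorem bisectGo_spec (b : List Int) (t : Int) :
    ∀ n lo hi, hi ≤ b.length → lo ≤ hi → hi - lo ≤ n →
    (∀ i, i < lo → Pc b i < t) → (∀ i, hi ≤ i → i ≤ b.length → t ≤ Pc b i) →
    (∀ i, i < bisectGo (buildP b) t n lo hi → Pc b i < t) ∧
    t ≤ Pc b (bisectGo (buildP b) t n lo hi) ∧
    bisectGo (buildP b) t n lo hi ≤ hi := by
  intro n
  induction n with
  | zero =>
    intro lo hi hhib hlohi hfuel hlow hhigh
    have : lo = hi := by omega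
    subst this
    simp only [bisectGo]
    exact ⟨hlow, hhigh lo (Nat.le_refl _) (by omega), Nat.le_refl _⟩
  | succ n ih =>
    intro lo hi hhib hlohi hfuel hlow hhigh
    by_cases hlt : lo < hi
    · have hmidlo : lo ≤ (lo + hi) / 2 := by omega
      have hmidhi : (lo + hi) / 2 < hi := by omega
      have hmidb : (lo + hi) / 2 ≤ b.length := by omega
      have hgd : (buildP b).getD ((lo + hi) / 2) 0 = Pc b ((lo + hi) / 2) :=
        buildP_getD b _ hmidb
      simp only [bisectGo, if_pos hlt, hgd]
      by_cases hcmp : Pc b ((lo + hi) / 2) < t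
      · simp only [if_pos hcmp]
        refine (ih ((lo + hi) / 2 + 1) hi hhib (by omega) (by omega) ?_ hhigh).imp id
          (fun h => h.imp id id)
        intro i hi2
        calc Pc b i ≤ Pc b ((lo + hi) / 2) := Pc_mono b (by omega)
          _ < t := hcmp
      · simp only [if_neg hcmp]
        have := ih lo ((lo + hi) / 2) (by omega) (by omega) (by omega) hlow
          (fun i hi2 hib => le_trans (by omega) (Pc_mono b hi2))
        exact ⟨this.1, this.2.1, by omega⟩
    · have : lo = hi := by omega
      subst this
      simp only [bisectGo, if_neg hlt]
      exact ⟨hlow, hhigh lo (Nat.le_refl _) (by omega), Nat.le_refl _⟩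

theorem min_unique (b : List Int) (k : Int) (r : Nat) (l1 l2 : Nat)
    (h1 : Pc b r - Pc b l1 ≤ k) (m1 : ∀ l, l < l1 → k < Pc b r - Pc b l)
    (h2 : Pc b r - Pc b l2 ≤ k) (m2 : ∀ l, l < l2 → k < Pc b r - Pc b l) : l1 = l2 := by
  rcases Nat.lt_trichotomy l1 l2 with h | h | h
  · exact absurd h1 (by have := m2 l1 h; omega)
  · exact h
  · exact absurd h2 (by have := m1 l2 h; omega)

-- joint invariant of A's fold state and B's running sum over range m
theorem loop_inv (b : List Int) (k : Int) (hk : 0 ≤ k) :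
    ∀ m, m ≤ b.length →
    ((List.range m).foldl (stepA b k) (0, 0, 0)).1 ≤ m ∧
    ((List.range m).foldl (stepA b k) (0, 0, 0)).2.1 =
      Pc b m - Pc b ((List.range m).foldl (stepA b k) (0, 0, 0)).1 ∧
    (∀ l, l < ((List.range m).foldl (stepA b k) (0, 0, 0)).1 → k < Pc b m - Pc b l) ∧
    ((List.range m).foldl (stepA b k) (0, 0, 0)).2.2 = (List.range m).foldl (stepB b k) 0 := by
  intro m
  induction m with
  | zero => simp [Pc]
  | succ m ih =>
    intro hm
    obtain ⟨hL, hC, hmin, hR⟩ := ih (by omega)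
    set st := (List.range m).foldl (stepA b k) (0, 0, 0) with hst
    have hfoldA : (List.range (m + 1)).foldl (stepA b k) (0, 0, 0) = stepA b k st m := by
      rw [List.range_succ, List.foldl_append, List.foldl_cons, List.foldl_nil]
    have hfoldB : (List.range (m + 1)).foldl (stepB b k) 0 =
        stepB b k ((List.range m).foldl (stepB b k) 0) m := by
      rw [List.range_succ, List.foldl_append, List.foldl_cons, List.foldl_nil]
    -- the count after reading b[m]
    have hcount : (if b.getD m 0 = 1 then st.2.1 + 1 else st.2.1) = Pc b (m + 1) - Pc b st.1 := by
      rw [Pc_step b m (by omega)]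
      split_ifs <;> omega
    have hmin' : ∀ l, l < st.1 → k < Pc b (m + 1) - Pc b l := by
      intro l hl
      have h1 := hmin l hl
      have h2 : Pc b m ≤ Pc b (m + 1) := Pc_mono b (by omega)
      omega
    -- A's new left via the while-loop spec
    have hw := countAWhileGo_spec b k hk (m + 1) (by omega) (b.length - st.1) st.1
      (if b.getD m 0 = 1 then st.2.1 + 1 else st.2.1) (Nat.le_refl _) (by omega) hcount hmin'
    set lA := (countAWhile b k st.1 (if b.getD m 0 = 1 then st.2.1 + 1 else st.2.1)) with hlA
    have hwA : lA.1 ≤ m + 1 ∧ lA.2 = Pc b (m + 1) - Pc b lA.1 ∧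
        Pc b (m + 1) - Pc b lA.1 ≤ k ∧ (∀ l, l < lA.1 → k < Pc b (m + 1) - Pc b l) := hw
    -- B's left via the bisect spec
    have hb := bisectGo_spec b ((buildP b).getD (m + 1) 0 - k) (m + 1 - 0) 0 (m + 1)
      (by omega) (by omega) (Nat.le_refl _) (by omega)
      (by
        intro i hi1 hi2
        rw [buildP_getD b (m + 1) (by omega)]
        have := Pc_mono b hi1
        omega)
    rw [buildP_getD b (m + 1) (by omega)] at hb
    set lB := bisectGo (buildP b) (Pc b (m + 1) - k) (m + 1 - 0) 0 (m + 1) with hlB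
    have hBeq : bisectL (buildP b) ((buildP b).getD (m + 1) 0 - k) 0 (m + 1) = lB := by
      rw [buildP_getD b (m + 1) (by omega)]; rfl
    -- the two lefts agree
    have hsame : lA.1 = lB :=
      min_unique b k (m + 1) lA.1 lB hwA.2.2.1 hwA.2.2.2 (by omega)
        (by intro l hl; have := hb.1 l hl; omega)
    refine ⟨?_, ?_, ?_, ?_⟩
    · rw [hfoldA]; simp only [stepA]; rw [← hlA]; exact hwA.1
    · rw [hfoldA]; simp only [stepA]; rw [← hlA]; exact hwA.2.1
    · rw [hfoldA]; simp only [stepA]; rw [← hlA]; exact hwA.2.2.2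
    · rw [hfoldA, hfoldB]
      simp only [stepA, stepB]
      rw [← hlA, hBeq, hsame, hR]

-- ===== VERDICT (by name: the statement is the Claim_ definition above) =====
theorem countAtMostK_spec : Claim_equal_countAtMostK := by
  intro b k _ hpre
  unfold Spec_countAtMostK countAtMostK countAtMostK_alt
  rcases hpre with hk | hnil
  · exact (loop_inv b k hk b.length (Nat.le_refl _)).2.2.2
  · subst hnil; rfl
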